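-- pv_equiv track=rewrite | github.com/zWHy2020/version20 | prepare_dataset.py | _choose_text_col
-- ===== SOURCE A (Python) =====
-- from typing import Any, Dict, Iterable, List, Optional, Tuple
--
-- def _choose_text_col(headers: List[str], text_col: Optional[str]) -> str:
--     if text_col:
--         if text_col not in headers:
--             raise ValueError(f"--text_col={text_col} 不在 CSV 列中: {headers}")
--         return text_col
--     lowered = [h.lower() for h in headers]
--     for idx, name in enumerate(lowered):
--         if "description" in name:
--             return headers[idx]
--     for idx, name in enumerate(lowered):
--         if "text" in name:
--             return headers[idx]
--     raise ValueError("未找到可用的文本列，请使用 --text_col 指定")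
-- ===== SOURCE B (Python) =====
-- def _choose_text_col(headers, text_col):
--     if text_col:
--         if text_col not in headers:
--             raise ValueError(f"--text_col={text_col} 不在 CSV 列中: {headers}")
--         return text_col
--     text_idx = None
--     for idx, h in enumerate(headers):
--         name = h.lower()
--         if "description" in name:
--             return h
--         if text_idx is None and "text" in name:
--             text_idx = idx
--     if text_idx is not None:
--         return headers[text_idx]
--     raise ValueError("未找到可用的文本列，请使用 --text_col 指定")
-- ===== Notes on version B (the rewrite author's own statement) =====
-- stated objective: alternative
-- what changed: Replaces A's lowered-list construction plus two separate enumerate scans (description pass, then text pass) with a single pass over the headers that returns on the first 'description' match and records the first 'text' candidate index for use after the loop.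
import Mathlib
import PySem

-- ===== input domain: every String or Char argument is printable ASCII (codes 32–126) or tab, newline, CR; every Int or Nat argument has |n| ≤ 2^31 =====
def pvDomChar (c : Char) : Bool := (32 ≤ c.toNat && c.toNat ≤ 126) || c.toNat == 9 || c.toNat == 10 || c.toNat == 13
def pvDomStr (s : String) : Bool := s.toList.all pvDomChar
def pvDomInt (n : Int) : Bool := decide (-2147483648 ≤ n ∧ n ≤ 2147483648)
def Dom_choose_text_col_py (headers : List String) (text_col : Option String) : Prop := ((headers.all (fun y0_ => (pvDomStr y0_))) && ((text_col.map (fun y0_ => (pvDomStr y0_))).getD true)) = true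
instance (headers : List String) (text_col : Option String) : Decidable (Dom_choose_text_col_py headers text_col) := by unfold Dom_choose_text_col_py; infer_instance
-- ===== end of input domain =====

-- B merges A's two enumerate scans (over a prebuilt lowered list) into one pass over the headers that
-- records the first 'text' candidate; alternative decomposition, same cost.
-- Both Pythons raise ValueError on the same inputs (excluded by Pre_); the ports return "" there (nothing claimed).

-- ===== PORT A =====
-- for idx, name in enumerate(lowered): if sub in name: return headers[idx]   (none = loop fell through)
def pvScanA (headers : List String) (pairs : List (Int × String)) (sub : String) : Option String :=
  match pairs with
  | [] => none
  | (idx, name) :: rest =>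
    if PySem.Str.isIn sub name then some ((PySem.List.pyGet? headers idx).getD "")
    else pvScanA headers rest sub

-- the two scans after the guard (falsy text_col)
def pvHeurA (headers : List String) : String :=
  match pvScanA headers (PySem.List.enumerate (headers.map PySem.Str.lower)) "description" with
  | some r => r
  | none =>
    match pvScanA headers (PySem.List.enumerate (headers.map PySem.Str.lower)) "text" with
    | some r => r
    | none => ""  -- raise ValueError (excluded by Pre_)

def choose_text_col_py (headers : List String) (text_col : Option String) : String :=
  if text_col.getD "" = "" then pvHeurA headers    -- 'if text_col:' is False (None or "")
  else if ¬ headers.contains (text_col.getD "") then ""  -- raise ValueError (excluded by Pre_)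
  else text_col.getD ""

-- ===== PORT B =====
-- single pass over enumerate(headers), lowering each header in place and carrying the first text-candidate index
def pvScanB (headers : List String) (pairs : List (Int × String)) (textIdx : Option Int) : String :=
  match pairs with
  | [] =>
    match textIdx with
    | some i => (PySem.List.pyGet? headers i).getD ""
    | none => ""  -- raise ValueError (excluded by Pre_)
  | (idx, h) :: rest =>
    let name := PySem.Str.lower h
    if PySem.Str.isIn "description" name then h
    else if textIdx.isNone && PySem.Str.isIn "text" name then pvScanB headers rest (some idx)
    else pvScanB headers rest textIdx

def choose_text_col_py_alt (headers : List String) (text_col : Option String) : String :=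
  if text_col.getD "" = "" then pvScanB headers (PySem.List.enumerate headers) none
  else if ¬ headers.contains (text_col.getD "") then ""  -- raise ValueError (excluded by Pre_)
  else text_col.getD ""

-- ===== PRECONDITION & SPEC =====
-- Pre_ excludes exactly the inputs where the Python raises ValueError: a truthy text_col absent from
-- headers, or a falsy text_col with no header whose lowercase form contains "description" or "text".
def Pre_choose_text_col_py (headers : List String) (text_col : Option String) : Prop :=
  if text_col.getD "" = "" then
    (headers.any (fun h => PySem.Str.isIn "description" (PySem.Str.lower h) || PySem.Str.isIn "text" (PySem.Str.lower h))) = true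
  else text_col.getD "" ∈ headers
instance (headers : List String) (text_col : Option String) : Decidable (Pre_choose_text_col_py headers text_col) := by unfold Pre_choose_text_col_py; infer_instance

def pvWitness_choose_text_col_py : List String × Option String := (["id", "Description"], none)

def Spec_choose_text_col_py (headers : List String) (text_col : Option String) (out : String) : Prop := out = choose_text_col_py_alt headers text_col
instance (headers : List String) (text_col : Option String) (out : String) : Decidable (Spec_choose_text_col_py headers text_col out) := by unfold Spec_choose_text_col_py; infer_instance

-- ===== CLAIM (what is proved, stated in full; the proofs are below) =====
def Claim_equal_choose_text_col_py : Prop := ∀ (headers : List String) (text_col : Option String), Dom_choose_text_col_py headers text_col → Pre_choose_text_col_py headers text_col → Spec_choose_text_col_py headers text_col (choose_text_col_py headers text_col)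

-- ===== LEMMAS AND PROOFS =====

-- proof-side helper: the A-scan with the lowering fused in (original-header pairs)
def pvScanA' (headers : List String) (pairs : List (Int × String)) (sub : String) : Option String :=
  match pairs with
  | [] => none
  | (idx, h) :: rest =>
    if PySem.Str.isIn sub (PySem.Str.lower h) then some ((PySem.List.pyGet? headers idx).getD "")
    else pvScanA' headers rest sub

-- enumerate commutes with mapping the payload
theorem pv_enumerate_map (f : String → String) (xs : List String) (s : Int) :
    PySem.List.enumerate (xs.map f) s = (PySem.List.enumerate xs s).map (fun p => (p.1, f p.2)) := by
  induction xs generalizing s with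
  | nil => simp [PySem.List.enumerate_nil]
  | cons x xs ih => simp [PySem.List.enumerate_cons, ih]

-- pvScanA over lowered pairs expressed on original-header pairs
theorem pv_scanA_map_lower (headers : List String) (pairs : List (Int × String)) (sub : String) :
    pvScanA headers (pairs.map (fun p => (p.1, PySem.Str.lower p.2))) sub =
      pvScanA' headers pairs sub := by
  induction pairs with
  | nil => rfl
  | cons p rest ih =>
    simp only [List.map_cons, pvScanA, pvScanA', ih]

-- B's single pass computes A's two passes, on pairs whose index really addresses their header
theorem pv_scanB_eq (headers : List String) (pairs : List (Int × String))
    (hmem : ∀ p ∈ pairs, PySem.List.pyGet? headers p.1 = some p.2) (textIdx : Option Int) :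
    pvScanB headers pairs textIdx =
      match pvScanA' headers pairs "description" with
      | some r => r
      | none =>
        match textIdx with
        | some i => (PySem.List.pyGet? headers i).getD ""
        | none =>
          match pvScanA' headers pairs "text" with
          | some r => r
          | none => "" := by
  induction pairs generalizing textIdx with
  | nil => cases textIdx <;> rfl
  | cons p rest ih =>
    obtain ⟨idx, h⟩ := p
    have hh : PySem.List.pyGet? headers idx = some h := hmem _ (List.mem_cons_self ..)
    have hrest := fun p hp => hmem p (List.mem_cons_of_mem _ hp)
    by_cases hd : PySem.Str.isIn "description" (PySem.Str.lower h) = true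
    · simp only [pvScanB, pvScanA', hd, if_pos, hh, Option.getD_some]
    · rw [Bool.not_eq_true] at hd
      by_cases ht : PySem.Str.isIn "text" (PySem.Str.lower h) = true
      · cases textIdx with
        | none =>
          simp only [pvScanB, pvScanA', hd, ht, Option.isNone_none, Bool.true_and,
            Bool.false_eq_true, if_false, if_true, ih hrest]
        | some i =>
          simp only [pvScanB, pvScanA', hd, ht, Option.isNone_some, Bool.false_and,
            Bool.false_eq_true, if_false, ih hrest]
      · rw [Bool.not_eq_true] at ht
        cases textIdx <;>
          simp only [pvScanB, pvScanA', hd, ht, Bool.and_false, Option.isNone_none,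
            Option.isNone_some, Bool.false_eq_true, if_false, ih hrest]

theorem pv_heur_eq (headers : List String) :
    pvHeurA headers = pvScanB headers (PySem.List.enumerate headers) none := by
  have hmem : ∀ p ∈ PySem.List.enumerate headers 0, PySem.List.pyGet? headers p.1 = some p.2 := by
    intro p hp
    rw [PySem.List.mem_enumerate_iff] at hp
    obtain ⟨k, hk, rfl⟩ := hp
    simp [hk]
  unfold pvHeurA
  rw [pv_enumerate_map, pv_scanA_map_lower, pv_scanA_map_lower, pv_scanB_eq headers _ hmem]

-- ===== VERDICT (by name: the statement is the Claim_ definition above) =====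
theorem choose_text_col_py_spec : Claim_equal_choose_text_col_py := by
  intro headers text_col _ _
  unfold Spec_choose_text_col_py choose_text_col_py choose_text_col_py_alt
  by_cases hT : text_col.getD "" = ""
  · simp only [hT, if_true, pv_heur_eq]
  · simp only [hT, if_false]
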